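-- pv_equiv track=rewrite | github.com/Krynegal/system_analysis | task4/task4.py | get_arrs
-- ===== SOURCE A (Python) =====
-- def get_arrs(graph):
--     a = [[], [], [], [], []]
--     for x in graph:
--         a[0].append(x[0])
--         a[1].append(x[1])
--     f, g = graph, graph
--     for i in range(len(f)):
--         for j in range(len(g)):
--             if i != j:
--                 if f[i][1] == g[j][0]:
--                     a[2].append(f[i][0])
--                 elif f[i][0] == g[j][1]:
--                     a[3].append(f[i][1])
--                 elif f[i][0] == g[j][0]:
--                     a[4].append(f[i][1])
--     return a
-- ===== SOURCE B (Python) =====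
-- def get_arrs(graph):
--     # One pass builds endpoint/pair counters; a second pass emits each row's
--     # contributions as repeated blocks -- O(n) instead of A's O(n^2) double scan.
--     c0, c1, cp = {}, {}, {}
--     for (u, v) in graph:
--         c0[u] = c0.get(u, 0) + 1
--         c1[v] = c1.get(v, 0) + 1
--         cp[(u, v)] = cp.get((u, v), 0) + 1
--     firsts, seconds, a2, a3, a4 = [], [], [], [], []
--     for (u, v) in graph:
--         firsts.append(u)
--         seconds.append(v)
--         n2 = c0.get(v, 0) - (1 if u == v else 0)
--         n3 = c1.get(u, 0) - cp.get((v, u), 0)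
--         n4 = 0 if u == v else c0.get(u, 0) - cp.get((u, u), 0) - 1
--         a2 += [u] * n2
--         a3 += [v] * n3
--         a4 += [v] * n4
--     return [firsts, seconds, a2, a3, a4]
-- ===== Notes on version B (the rewrite author's own statement) =====
-- stated objective: faster
-- what changed: A compares every ordered pair of edges (nested loops, O(n^2)); B builds counters of first endpoints, second endpoints and whole edges in one pass and emits, per edge, the qualifying match counts (with elif priority and self-exclusion handled arithmetically) as repeated blocks, in O(n).
import Mathlib
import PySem

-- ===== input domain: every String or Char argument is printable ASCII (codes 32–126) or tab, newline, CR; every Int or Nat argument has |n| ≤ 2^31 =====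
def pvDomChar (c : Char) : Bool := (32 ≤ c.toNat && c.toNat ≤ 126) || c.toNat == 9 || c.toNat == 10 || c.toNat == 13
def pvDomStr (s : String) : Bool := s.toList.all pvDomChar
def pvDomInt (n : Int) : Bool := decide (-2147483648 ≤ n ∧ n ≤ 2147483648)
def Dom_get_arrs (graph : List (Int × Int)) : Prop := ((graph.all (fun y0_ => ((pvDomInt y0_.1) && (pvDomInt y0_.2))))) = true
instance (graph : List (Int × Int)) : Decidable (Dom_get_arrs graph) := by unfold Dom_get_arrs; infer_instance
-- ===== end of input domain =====

-- B replaces A's quadratic all-pairs scan by endpoint/edge counters built in one pass,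
-- emitting each row's matches as repeated blocks (objective: faster).

-- ===== PORT A =====
def get_arrs (graph : List (Int × Int)) : List (List Int) :=
  let a01 := graph.foldl (fun s x => (s.1 ++ [x.1], s.2 ++ [x.2])) (([] : List Int), ([] : List Int))
  let n := PySem.List.len graph
  let t := (PySem.List.pyRange 0 n 1).foldl (fun s i =>
    (PySem.List.pyRange 0 n 1).foldl (fun s j =>
      if i ≠ j then
        let fi := PySem.List.pyGetD graph i ((0 : Int), (0 : Int))
        let gj := PySem.List.pyGetD graph j ((0 : Int), (0 : Int))
        if fi.2 == gj.1 then (s.1 ++ [fi.1], s.2.1, s.2.2)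
        else if fi.1 == gj.2 then (s.1, s.2.1 ++ [fi.2], s.2.2)
        else if fi.1 == gj.1 then (s.1, s.2.1, s.2.2 ++ [fi.2])
        else s
      else s) s) (([] : List Int), ([] : List Int), ([] : List Int))
  [a01.1, a01.2, t.1, t.2.1, t.2.2]

-- ===== PORT B =====
def get_arrs_alt (graph : List (Int × Int)) : List (List Int) :=
  let cs := graph.foldl (fun s x =>
      (s.1.insert x.1 (s.1.getD x.1 0 + 1),
       s.2.1.insert x.2 (s.2.1.getD x.2 0 + 1),
       s.2.2.insert (x.1, x.2) (s.2.2.getD (x.1, x.2) 0 + 1)))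
    ((PySem.Dict.empty : PySem.Dict Int Int), (PySem.Dict.empty : PySem.Dict Int Int),
     (PySem.Dict.empty : PySem.Dict (Int × Int) Int))
  let r := graph.foldl (fun s x =>
      let n2 : Int := cs.1.getD x.2 0 - (if x.1 == x.2 then 1 else 0)
      let n3 : Int := cs.2.1.getD x.1 0 - cs.2.2.getD (x.2, x.1) 0
      let n4 : Int := if x.1 == x.2 then 0 else cs.1.getD x.1 0 - cs.2.2.getD (x.1, x.1) 0 - 1
      (s.1 ++ [x.1], s.2.1 ++ [x.2], s.2.2.1 ++ PySem.List.pyRepeat [x.1] n2,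
       s.2.2.2.1 ++ PySem.List.pyRepeat [x.2] n3, s.2.2.2.2 ++ PySem.List.pyRepeat [x.2] n4))
    (([] : List Int), ([] : List Int), ([] : List Int), ([] : List Int), ([] : List Int))
  [r.1, r.2.1, r.2.2.1, r.2.2.2.1, r.2.2.2.2]

-- ===== PRECONDITION & SPEC =====
def Spec_get_arrs (graph : List (Int × Int)) (out : List (List Int)) : Prop := out = get_arrs_alt graph
instance (graph : List (Int × Int)) (out : List (List Int)) : Decidable (Spec_get_arrs graph out) := by unfold Spec_get_arrs; infer_instance

-- ===== CLAIM =====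
def Claim_equal_get_arrs : Prop := ∀ (graph : List (Int × Int)), Dom_get_arrs graph → Spec_get_arrs graph (get_arrs graph)

-- ===== LEMMAS AND PROOFS =====

def pvF2 (graph : List (Int × Int)) (p : Int × (Int × Int)) : List Int :=
  List.replicate ((PySem.List.enumerate graph 0).countP fun q => (q.1 != p.1) && (p.2.2 == q.2.1)) p.2.1
def pvF3 (graph : List (Int × Int)) (p : Int × (Int × Int)) : List Int :=
  List.replicate ((PySem.List.enumerate graph 0).countP fun q =>
    (q.1 != p.1) && (!(p.2.2 == q.2.1) && (p.2.1 == q.2.2))) p.2.2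
def pvF4 (graph : List (Int × Int)) (p : Int × (Int × Int)) : List Int :=
  List.replicate ((PySem.List.enumerate graph 0).countP fun q =>
    (q.1 != p.1) && (!(p.2.2 == q.2.1) && (!(p.2.1 == q.2.2) && (p.2.1 == q.2.1)))) p.2.2
def pvG2 (graph : List (Int × Int)) (x : Int × Int) : List Int :=
  PySem.List.pyRepeat [x.1] ((graph.countP (fun y => y.1 == x.2) : Int) - (if x.1 == x.2 then 1 else 0))
def pvG3 (graph : List (Int × Int)) (x : Int × Int) : List Int :=
  PySem.List.pyRepeat [x.2] ((graph.countP (fun y => y.2 == x.1) : Int) - (graph.countP (fun y => (y.1, y.2) == (x.2, x.1)) : Int))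
def pvG4 (graph : List (Int × Int)) (x : Int × Int) : List Int :=
  PySem.List.pyRepeat [x.2] (if x.1 == x.2 then 0 else (graph.countP (fun y => y.1 == x.1) : Int) - (graph.countP (fun y => (y.1, y.2) == (x.1, x.1)) : Int) - 1)


theorem pv_countP_enum_ne {α : Type} (xs : List α) (P : α → Bool) :
    ∀ (s : Int) (k : Nat) (hk : k < xs.length),
    (PySem.List.enumerate xs s).countP (fun p => (p.1 != (s + (k : Int))) && P p.2)
      = xs.countP P - (if P xs[k] then 1 else 0) := by
  induction xs with
  | nil => intro s k hk; simp at hk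
  | cons x t ih =>
    intro s k hk
    rw [PySem.List.enumerate_cons]
    have h3 : ∀ r : Int, (PySem.List.enumerate t r).countP (fun p => P p.2) = t.countP P := by
      intro r
      conv_rhs => rw [← PySem.List.map_snd_enumerate t r]
      rw [List.countP_map]
      rfl
    cases k with
    | zero =>
      simp only [List.countP_cons, List.getElem_cons_zero, Nat.cast_zero, add_zero]
      have h1 : (s != s) = false := by simp
      have h2 : (PySem.List.enumerate t (s+1)).countP (fun p => (p.1 != s) && P p.2)
          = (PySem.List.enumerate t (s+1)).countP (fun p => P p.2) := by
        apply List.countP_congr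
        intro p hp
        rcases (PySem.List.mem_enumerate_iff t (s+1) p).1 hp with ⟨k', hk', rfl⟩
        have : s + 1 + (k' : Int) ≠ s := by omega
        simp [this]
      simp only [h1, Bool.false_and]
      rw [h2, h3]
      simp only [Bool.false_eq_true, if_false]
      split_ifs <;> omega
    | succ k' =>
      simp only [List.countP_cons, List.getElem_cons_succ]
      have h1 : (s != (s + ((k' + 1 : Nat) : Int))) = true := by
        simp only [bne_iff_ne, ne_eq]; push_cast; omega
      have h2 : (PySem.List.enumerate t (s+1)).countP (fun p => (p.1 != (s + ((k'+1 : Nat) : Int))) && P p.2)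
          = (PySem.List.enumerate t (s+1)).countP (fun p => (p.1 != ((s+1) + (k' : Int))) && P p.2) := by
        apply List.countP_congr; intro p hp
        have : (s + ((k'+1 : Nat) : Int)) = ((s+1) + (k' : Int)) := by push_cast; omega
        rw [this]
      have hk't : k' < t.length := by simpa using hk
      have hpos : P t[k'] = true → 0 < t.countP P := by
        intro h
        rw [List.countP_pos_iff]
        exact ⟨t[k'], List.getElem_mem hk't, h⟩
      rw [h2, ih (s+1) k' hk't, h1]
      simp only [Bool.true_and]
      split_ifs <;> first | omega | (have := hpos (by assumption); omega)

theorem pv_flatMap_enum_congr {α β : Type} (xs : List α) (F : Int × α → List β) (G : α → List β) :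
    ∀ (s : Int), (∀ (k : Nat) (hk : k < xs.length), F (s + (k : Int), xs[k]) = G xs[k]) →
    (PySem.List.enumerate xs s).flatMap F = xs.flatMap G := by
  induction xs with
  | nil => intro s h; simp [PySem.List.enumerate_nil]
  | cons x t ih =>
    intro s h
    rw [PySem.List.enumerate_cons]
    simp only [List.flatMap_cons]
    have h0 := h 0 (by simp)
    simp only [List.getElem_cons_zero, Nat.cast_zero, add_zero] at h0
    rw [h0, ih (s+1) (fun k hk => by
      have := h (k+1) (by simpa using Nat.succ_lt_succ hk)
      simpa [add_assoc, add_comm, add_left_comm] using this)]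

theorem pv_foldl_pyRange_enum {σ : Type} (xs : List (Int × Int)) (d : Int × Int)
    (F : σ → Int × (Int × Int) → σ) (init : σ) :
    (PySem.List.pyRange 0 (PySem.List.len xs) 1).foldl
        (fun s j => F s (j, PySem.List.pyGetD xs j d)) init
      = (PySem.List.enumerate xs 0).foldl F init := by
  rw [PySem.List.enumerate_eq_map_pyRange (d := d), List.foldl_map]

theorem pv_inner (i u v : Int) (l : List (Int × (Int × Int))) :
    ∀ s1 s2 s3 : List Int,
    l.foldl (fun s p =>
        if i ≠ p.1 then
          if v == p.2.1 then (s.1 ++ [u], s.2.1, s.2.2)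
          else if u == p.2.2 then (s.1, s.2.1 ++ [v], s.2.2)
          else if u == p.2.1 then (s.1, s.2.1, s.2.2 ++ [v])
          else s
        else s) (s1, s2, s3)
      = (s1 ++ List.replicate (l.countP fun p => (p.1 != i) && (v == p.2.1)) u,
         s2 ++ List.replicate (l.countP fun p => (p.1 != i) && (!(v == p.2.1) && (u == p.2.2))) v,
         s3 ++ List.replicate (l.countP fun p => (p.1 != i) && (!(v == p.2.1) && (!(u == p.2.2) && (u == p.2.1)))) v) := by
  induction l with
  | nil => simp
  | cons p t ih =>
    intro s1 s2 s3
    rw [List.foldl_cons]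
    by_cases hi : i ≠ p.1
    · have hbne : (p.1 != i) = true := by simp; omega
      rw [if_pos hi]
      rcases Bool.dichotomy (v == p.2.1) with hc2 | hc2
      · rw [if_neg (by simp [hc2])]
        rcases Bool.dichotomy (u == p.2.2) with hc3 | hc3
        · rw [if_neg (by simp [hc3])]
          rcases Bool.dichotomy (u == p.2.1) with hc4 | hc4
          · rw [if_neg (by simp [hc4]), ih]
            simp [hbne, hc2, hc3, hc4]
          · rw [if_pos hc4, ih]
            simp [hbne, hc2, hc3, hc4, List.replicate_succ]
        · rw [if_pos hc3, ih]
          simp [hbne, hc2, hc3, List.replicate_succ]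
      · rw [if_pos hc2, ih]
        simp [hbne, hc2, List.replicate_succ]
    · have hbne : (p.1 != i) = false := by simp; omega
      rw [if_neg hi, ih]
      simp [hbne]

theorem pv_blocks3 {α : Type} (l : List α) (f2 f3 f4 : α → List Int) :
    ∀ s1 s2 s3 : List Int,
    l.foldl (fun s x => (s.1 ++ f2 x, s.2.1 ++ f3 x, s.2.2 ++ f4 x)) (s1, s2, s3)
      = (s1 ++ l.flatMap f2, s2 ++ l.flatMap f3, s3 ++ l.flatMap f4) := by
  induction l with
  | nil => simp
  | cons h t ih => intro s1 s2 s3; simp [ih]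

theorem pv_prod2 {α : Type} (l : List α) (f g : α → Int) :
    ∀ s1 s2 : List Int,
    l.foldl (fun s x => (s.1 ++ [f x], s.2 ++ [g x])) (s1, s2)
      = (s1 ++ l.map f, s2 ++ l.map g) := by
  induction l with
  | nil => simp
  | cons h t ih => intro s1 s2; simp [ih]

theorem pv_A_char (graph : List (Int × Int)) :
    get_arrs graph
      = [graph.map (fun y => y.1), graph.map (fun y => y.2),
         (PySem.List.enumerate graph 0).flatMap (pvF2 graph),
         (PySem.List.enumerate graph 0).flatMap (pvF3 graph),
         (PySem.List.enumerate graph 0).flatMap (pvF4 graph)] := by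
  unfold get_arrs
  dsimp only
  rw [pv_prod2 graph (fun y => y.1) (fun y => y.2) [] []]
  have houter :
      (PySem.List.pyRange 0 (PySem.List.len graph) 1).foldl (fun s i =>
        (PySem.List.pyRange 0 (PySem.List.len graph) 1).foldl (fun s j =>
          if i ≠ j then
            if (PySem.List.pyGetD graph i ((0 : Int), (0 : Int))).2 == (PySem.List.pyGetD graph j ((0 : Int), (0 : Int))).1 then
              (s.1 ++ [(PySem.List.pyGetD graph i ((0 : Int), (0 : Int))).1], s.2.1, s.2.2)
            else if (PySem.List.pyGetD graph i ((0 : Int), (0 : Int))).1 == (PySem.List.pyGetD graph j ((0 : Int), (0 : Int))).2 then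
              (s.1, s.2.1 ++ [(PySem.List.pyGetD graph i ((0 : Int), (0 : Int))).2], s.2.2)
            else if (PySem.List.pyGetD graph i ((0 : Int), (0 : Int))).1 == (PySem.List.pyGetD graph j ((0 : Int), (0 : Int))).1 then
              (s.1, s.2.1, s.2.2 ++ [(PySem.List.pyGetD graph i ((0 : Int), (0 : Int))).2])
            else s
          else s) s) (([] : List Int), ([] : List Int), ([] : List Int))
      = ((PySem.List.enumerate graph 0).flatMap (pvF2 graph),
         (PySem.List.enumerate graph 0).flatMap (pvF3 graph),
         (PySem.List.enumerate graph 0).flatMap (pvF4 graph)) := by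
    refine Eq.trans (pv_foldl_pyRange_enum graph ((0 : Int), (0 : Int))
      (fun s p =>
        (PySem.List.pyRange 0 (PySem.List.len graph) 1).foldl (fun s j =>
          if p.1 ≠ j then
            if p.2.2 == (PySem.List.pyGetD graph j ((0 : Int), (0 : Int))).1 then
              (s.1 ++ [p.2.1], s.2.1, s.2.2)
            else if p.2.1 == (PySem.List.pyGetD graph j ((0 : Int), (0 : Int))).2 then
              (s.1, s.2.1 ++ [p.2.2], s.2.2)
            else if p.2.1 == (PySem.List.pyGetD graph j ((0 : Int), (0 : Int))).1 then
              (s.1, s.2.1, s.2.2 ++ [p.2.2])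
            else s
          else s) s)
      (([] : List Int), ([] : List Int), ([] : List Int))) ?_
    have hfun : ∀ (acc : List Int × List Int × List Int) (p : Int × (Int × Int)),
        ((PySem.List.pyRange 0 (PySem.List.len graph) 1).foldl (fun s j =>
          if p.1 ≠ j then
            if p.2.2 == (PySem.List.pyGetD graph j ((0 : Int), (0 : Int))).1 then
              (s.1 ++ [p.2.1], s.2.1, s.2.2)
            else if p.2.1 == (PySem.List.pyGetD graph j ((0 : Int), (0 : Int))).2 then
              (s.1, s.2.1 ++ [p.2.2], s.2.2)
            else if p.2.1 == (PySem.List.pyGetD graph j ((0 : Int), (0 : Int))).1 then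
              (s.1, s.2.1, s.2.2 ++ [p.2.2])
            else s
          else s) acc)
        = (acc.1 ++ pvF2 graph p, acc.2.1 ++ pvF3 graph p, acc.2.2 ++ pvF4 graph p) := by
      intro acc p
      obtain ⟨s1, s2, s3⟩ := acc
      refine Eq.trans (pv_foldl_pyRange_enum graph ((0 : Int), (0 : Int))
        (fun s q =>
          if p.1 ≠ q.1 then
            if p.2.2 == q.2.1 then (s.1 ++ [p.2.1], s.2.1, s.2.2)
            else if p.2.1 == q.2.2 then (s.1, s.2.1 ++ [p.2.2], s.2.2)
            else if p.2.1 == q.2.1 then (s.1, s.2.1, s.2.2 ++ [p.2.2])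
            else s
          else s) (s1, s2, s3)) ?_
      exact pv_inner p.1 p.2.1 p.2.2 (PySem.List.enumerate graph 0) s1 s2 s3
    calc _ = (PySem.List.enumerate graph 0).foldl
            (fun acc p => (acc.1 ++ pvF2 graph p, acc.2.1 ++ pvF3 graph p, acc.2.2 ++ pvF4 graph p))
            (([] : List Int), ([] : List Int), ([] : List Int)) := by
            apply PySem.List.foldl_congr_mem
            intro acc p _
            exact hfun acc p
      _ = _ := by
            rw [pv_blocks3]
            simp
  rw [houter]
  simp

theorem pv_flatMap_single {α β : Type} (l : List α) (f : α → β) :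
    l.flatMap (fun x => [f x]) = l.map f := by
  induction l with
  | nil => simp
  | cons h t ih => simp [ih]

theorem pv_blocks5 {α : Type} (l : List α) (f1 f2 f3 f4 f5 : α → List Int) :
    ∀ s1 s2 s3 s4 s5 : List Int,
    l.foldl (fun s x => (s.1 ++ f1 x, s.2.1 ++ f2 x, s.2.2.1 ++ f3 x,
        s.2.2.2.1 ++ f4 x, s.2.2.2.2 ++ f5 x)) (s1, s2, s3, s4, s5)
      = (s1 ++ l.flatMap f1, s2 ++ l.flatMap f2, s3 ++ l.flatMap f3,
         s4 ++ l.flatMap f4, s5 ++ l.flatMap f5) := by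
  induction l with
  | nil => simp
  | cons h t ih => intro s1 s2 s3 s4 s5; simp [ih]

theorem pv_count_fst (graph : List (Int × Int)) (w : Int) :
    (graph.foldl (fun d x => d.insert x.1 (d.getD x.1 0 + 1))
        (PySem.Dict.empty : PySem.Dict Int Int)).getD w 0
      = (graph.countP (fun y => y.1 == w) : Int) := by
  have h1 : (graph.map (fun y => y.1)).foldl (fun d k => d.insert k (d.getD k 0 + 1))
        (PySem.Dict.empty : PySem.Dict Int Int)
      = graph.foldl (fun d x => d.insert x.1 (d.getD x.1 0 + 1))
        (PySem.Dict.empty : PySem.Dict Int Int) := by rw [List.foldl_map]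
  rw [← h1, PySem.Dict.getD_foldl_insert_add_one, PySem.Dict.getD_empty]
  rw [show List.count w (List.map (fun y => y.1) graph) = List.countP (fun y => y.1 == w) graph from by
    simp only [List.count, List.countP_map]; rfl]
  omega

theorem pv_count_snd (graph : List (Int × Int)) (w : Int) :
    (graph.foldl (fun d x => d.insert x.2 (d.getD x.2 0 + 1))
        (PySem.Dict.empty : PySem.Dict Int Int)).getD w 0
      = (graph.countP (fun y => y.2 == w) : Int) := by
  have h1 : (graph.map (fun y => y.2)).foldl (fun d k => d.insert k (d.getD k 0 + 1))
        (PySem.Dict.empty : PySem.Dict Int Int)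
      = graph.foldl (fun d x => d.insert x.2 (d.getD x.2 0 + 1))
        (PySem.Dict.empty : PySem.Dict Int Int) := by rw [List.foldl_map]
  rw [← h1, PySem.Dict.getD_foldl_insert_add_one, PySem.Dict.getD_empty]
  rw [show List.count w (List.map (fun y => y.2) graph) = List.countP (fun y => y.2 == w) graph from by
    simp only [List.count, List.countP_map]; rfl]
  omega

theorem pv_count_pair (graph : List (Int × Int)) (w : Int × Int) :
    (graph.foldl (fun d x => d.insert (x.1, x.2) (d.getD (x.1, x.2) 0 + 1))
        (PySem.Dict.empty : PySem.Dict (Int × Int) Int)).getD w 0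
      = (graph.countP (fun y => (y.1, y.2) == w) : Int) := by
  have h1 : (graph.map (fun y => (y.1, y.2))).foldl (fun d k => d.insert k (d.getD k 0 + 1))
        (PySem.Dict.empty : PySem.Dict (Int × Int) Int)
      = graph.foldl (fun d x => d.insert (x.1, x.2) (d.getD (x.1, x.2) 0 + 1))
        (PySem.Dict.empty : PySem.Dict (Int × Int) Int) := by rw [List.foldl_map]
  rw [← h1, PySem.Dict.getD_foldl_insert_add_one, PySem.Dict.getD_empty]
  rw [show List.count w (List.map (fun y => (y.1, y.2)) graph) = List.countP (fun y => (y.1, y.2) == w) graph from by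
    simp only [List.count, List.countP_map]; rfl]
  omega

theorem pv_B_char (graph : List (Int × Int)) :
    get_arrs_alt graph
      = [graph.map (fun y => y.1), graph.map (fun y => y.2),
         graph.flatMap (pvG2 graph), graph.flatMap (pvG3 graph), graph.flatMap (pvG4 graph)] := by
  unfold get_arrs_alt
  dsimp only
  have hcs : graph.foldl (fun s x =>
      (s.1.insert x.1 (s.1.getD x.1 0 + 1),
       s.2.1.insert x.2 (s.2.1.getD x.2 0 + 1),
       s.2.2.insert (x.1, x.2) (s.2.2.getD (x.1, x.2) 0 + 1)))
      ((PySem.Dict.empty : PySem.Dict Int Int), (PySem.Dict.empty : PySem.Dict Int Int),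
       (PySem.Dict.empty : PySem.Dict (Int × Int) Int))
    = (graph.foldl (fun (d : PySem.Dict Int Int) x => d.insert x.1 (d.getD x.1 0 + 1)) PySem.Dict.empty,
       graph.foldl (fun (d : PySem.Dict Int Int) x => d.insert x.2 (d.getD x.2 0 + 1)) PySem.Dict.empty,
       graph.foldl (fun (d : PySem.Dict (Int × Int) Int) x => d.insert (x.1, x.2) (d.getD (x.1, x.2) 0 + 1)) PySem.Dict.empty) := by
    refine Eq.trans (PySem.List.foldl_prod_mk
      (f := fun (d : PySem.Dict Int Int) (x : Int × Int) => d.insert x.1 (d.getD x.1 0 + 1))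
      (g := fun (c : PySem.Dict Int Int × PySem.Dict (Int × Int) Int) x =>
        (c.1.insert x.2 (c.1.getD x.2 0 + 1), c.2.insert (x.1, x.2) (c.2.getD (x.1, x.2) 0 + 1)))
      (l := graph) ..) ?_
    rw [PySem.List.foldl_prod_mk
      (f := fun (d : PySem.Dict Int Int) (x : Int × Int) => d.insert x.2 (d.getD x.2 0 + 1))
      (g := fun (c : PySem.Dict (Int × Int) Int) x => c.insert (x.1, x.2) (c.getD (x.1, x.2) 0 + 1))]
  rw [hcs]
  have hbody : (graph.foldl (fun s x =>
      (s.1 ++ [x.1], s.2.1 ++ [x.2],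
       s.2.2.1 ++ PySem.List.pyRepeat [x.1]
         ((graph.foldl (fun (d : PySem.Dict Int Int) x => d.insert x.1 (d.getD x.1 0 + 1)) PySem.Dict.empty).getD x.2 0 - (if x.1 == x.2 then 1 else 0)),
       s.2.2.2.1 ++ PySem.List.pyRepeat [x.2]
         ((graph.foldl (fun (d : PySem.Dict Int Int) x => d.insert x.2 (d.getD x.2 0 + 1)) PySem.Dict.empty).getD x.1 0
           - (graph.foldl (fun (d : PySem.Dict (Int × Int) Int) x => d.insert (x.1, x.2) (d.getD (x.1, x.2) 0 + 1)) PySem.Dict.empty).getD (x.2, x.1) 0),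
       s.2.2.2.2 ++ PySem.List.pyRepeat [x.2]
         (if x.1 == x.2 then 0 else
           (graph.foldl (fun (d : PySem.Dict Int Int) x => d.insert x.1 (d.getD x.1 0 + 1)) PySem.Dict.empty).getD x.1 0
           - (graph.foldl (fun (d : PySem.Dict (Int × Int) Int) x => d.insert (x.1, x.2) (d.getD (x.1, x.2) 0 + 1)) PySem.Dict.empty).getD (x.1, x.1) 0 - 1)))
      ([], [], [], [], []))
    = graph.foldl (fun s x => (s.1 ++ (fun x : Int × Int => [x.1]) x, s.2.1 ++ (fun x : Int × Int => [x.2]) x,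
        s.2.2.1 ++ pvG2 graph x, s.2.2.2.1 ++ pvG3 graph x, s.2.2.2.2 ++ pvG4 graph x)) ([], [], [], [], []) := by
    apply PySem.List.foldl_congr_mem
    intro acc x hx
    simp only [pvG2, pvG3, pvG4, pv_count_fst, pv_count_snd, pv_count_pair]
  rw [hbody, pv_blocks5]
  simp [pv_flatMap_single]

theorem pv_countP_split {α : Type} (l : List α) (p q : α → Bool) :
    l.countP p = l.countP (fun x => p x && q x) + l.countP (fun x => p x && !q x) := by
  induction l with
  | nil => simp
  | cons h t ih =>
    simp only [List.countP_cons, ih]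
    cases hp : p h <;> cases hq : q h <;> simp <;> omega

theorem pv_F2G2 (graph : List (Int × Int)) (k : Nat) (hk : k < graph.length) :
    pvF2 graph ((0 : Int) + (k : Int), graph[k]) = pvG2 graph graph[k] := by
  unfold pvF2 pvG2
  rw [PySem.List.pyRepeat_singleton]
  rw [pv_countP_enum_ne graph (fun y => (graph[k].2 == y.1)) 0 k hk]
  congr 1
  have hcc : graph.countP (fun y => graph[k].2 == y.1) = graph.countP (fun y => y.1 == graph[k].2) :=
    List.countP_congr (fun a _ => by rw [Bool.beq_comm])
  have hsym : (graph[k].2 == graph[k].1) = (graph[k].1 == graph[k].2) := Bool.beq_comm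
  rw [hcc, hsym]
  split_ifs <;> omega

theorem pv_F3G3 (graph : List (Int × Int)) (k : Nat) (hk : k < graph.length) :
    pvF3 graph ((0 : Int) + (k : Int), graph[k]) = pvG3 graph graph[k] := by
  unfold pvF3 pvG3
  rw [PySem.List.pyRepeat_singleton]
  rw [pv_countP_enum_ne graph (fun y => !(graph[k].2 == y.1) && (graph[k].1 == y.2)) 0 k hk]
  congr 1
  have hself : (!(graph[k].2 == graph[k].1) && (graph[k].1 == graph[k].2)) = false := by
    rcases Bool.dichotomy (graph[k].1 == graph[k].2) with h | h
    · simp [h]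
    · have : (graph[k].2 == graph[k].1) = true := by rw [Bool.beq_comm]; exact h
      simp [this]
  rw [hself]
  have hsplit := pv_countP_split graph (fun y => y.2 == graph[k].1) (fun y => y.1 == graph[k].2)
  have h1 : graph.countP (fun y => !(graph[k].2 == y.1) && (graph[k].1 == y.2))
      = graph.countP (fun y => (y.2 == graph[k].1) && !(y.1 == graph[k].2)) := by
    apply List.countP_congr
    intro a _
    rw [show (graph[k].2 == a.1) = (a.1 == graph[k].2) from Bool.beq_comm,
        show (graph[k].1 == a.2) = (a.2 == graph[k].1) from Bool.beq_comm,
        Bool.and_comm]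
  have h2 : graph.countP (fun y => (y.1, y.2) == (graph[k].2, graph[k].1))
      = graph.countP (fun y => (y.2 == graph[k].1) && (y.1 == graph[k].2)) := by
    apply List.countP_congr
    intro a _
    show ((a.1, a.2) == (graph[k].2, graph[k].1)) = true ↔ _
    rw [show ((a.1, a.2) == (graph[k].2, graph[k].1)) = ((a.1 == graph[k].2) && (a.2 == graph[k].1)) from rfl,
        Bool.and_comm]
  rw [h1, h2]
  simp only [Bool.false_eq_true, if_false, Nat.sub_zero]
  omega

theorem pv_F4G4 (graph : List (Int × Int)) (k : Nat) (hk : k < graph.length) :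
    pvF4 graph ((0 : Int) + (k : Int), graph[k]) = pvG4 graph graph[k] := by
  unfold pvF4 pvG4
  rw [PySem.List.pyRepeat_singleton]
  rw [pv_countP_enum_ne graph
    (fun y => !(graph[k].2 == y.1) && (!(graph[k].1 == y.2) && (graph[k].1 == y.1))) 0 k hk]
  congr 1
  rcases Bool.dichotomy (graph[k].1 == graph[k].2) with heq | heq
  · -- u ≠ v
    have hself : (!(graph[k].2 == graph[k].1) && (!(graph[k].1 == graph[k].2) && (graph[k].1 == graph[k].1))) = true := by
      have h1 : (graph[k].2 == graph[k].1) = false := by rw [Bool.beq_comm]; exact heq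
      simp [h1, heq]
    rw [hself, heq]
    have hne : ¬ (graph[k].1 = graph[k].2) := by simpa using heq
    have h1 : graph.countP (fun y => !(graph[k].2 == y.1) && (!(graph[k].1 == y.2) && (graph[k].1 == y.1)))
        = graph.countP (fun y => (y.1 == graph[k].1) && !(y.2 == graph[k].1)) := by
      apply List.countP_congr
      intro a _
      simp
      omega
    have h2 : graph.countP (fun y => (y.1, y.2) == (graph[k].1, graph[k].1))
        = graph.countP (fun y => (y.1 == graph[k].1) && (y.2 == graph[k].1)) := by
      apply List.countP_congr
      intro a _
      show ((a.1, a.2) == (graph[k].1, graph[k].1)) = true ↔ _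
      rw [show ((a.1, a.2) == (graph[k].1, graph[k].1)) = ((a.1 == graph[k].1) && (a.2 == graph[k].1)) from rfl]
    have hsplit := pv_countP_split graph (fun y => y.1 == graph[k].1) (fun y => y.2 == graph[k].1)
    rw [h1, h2]
    simp only [if_true, Bool.false_eq_true, if_false]
    omega
  · -- u = v
    have hequ : graph[k].1 = graph[k].2 := by simpa using heq
    have hself : (!(graph[k].2 == graph[k].1) && (!(graph[k].1 == graph[k].2) && (graph[k].1 == graph[k].1))) = false := by
      simp [heq]
    have hzero : graph.countP (fun y => !(graph[k].2 == y.1) && (!(graph[k].1 == y.2) && (graph[k].1 == y.1))) = 0 := by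
      apply List.countP_eq_zero.2
      intro a _
      simp
      omega
    rw [hself, hzero, heq]
    simp

-- ===== VERDICT =====
theorem get_arrs_spec : Claim_equal_get_arrs := by
  intro graph _
  unfold Spec_get_arrs
  rw [pv_A_char, pv_B_char]
  rw [pv_flatMap_enum_congr graph (pvF2 graph) (pvG2 graph) 0 (fun k hk => pv_F2G2 graph k hk),
      pv_flatMap_enum_congr graph (pvF3 graph) (pvG3 graph) 0 (fun k hk => pv_F3G3 graph k hk),
      pv_flatMap_enum_congr graph (pvF4 graph) (pvG4 graph) 0 (fun k hk => pv_F4G4 graph k hk)]
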